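-- pv_equiv track=rewrite | github.com/martintufte/rubiks-cube | rubiks_cube/utils/string.py | remove_wide_notation
-- ===== SOURCE A (Python) =====
-- def remove_wide_notation(input_string: str) -> str:
--     """Replace old wide notation with new wide notation."""
--
--     output_string = input_string
--     replace_dict = {
--         "u": "Uw", "d": "Dw", "f": "Fw", "b": "Bw", "l": "Lw", "r": "Rw",
--     }
--     for old, new in replace_dict.items():
--         output_string = output_string.replace(old, new)
--
--     return output_string
-- ===== SOURCE B (Python) =====
-- def remove_wide_notation(input_string: str) -> str:
--     """Replace old wide notation with new wide notation (single pass)."""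
--     replace_dict = {
--         "u": "Uw", "d": "Dw", "f": "Fw", "b": "Bw", "l": "Lw", "r": "Rw",
--     }
--     return "".join(replace_dict.get(c, c) for c in input_string)
-- ===== Notes on version B (the rewrite author's own statement) =====
-- stated objective: simpler
-- what changed: B makes one left-to-right pass over the characters, mapping each through a single dict lookup, instead of A's six whole-string replace passes (one per rule).
import Mathlib
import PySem

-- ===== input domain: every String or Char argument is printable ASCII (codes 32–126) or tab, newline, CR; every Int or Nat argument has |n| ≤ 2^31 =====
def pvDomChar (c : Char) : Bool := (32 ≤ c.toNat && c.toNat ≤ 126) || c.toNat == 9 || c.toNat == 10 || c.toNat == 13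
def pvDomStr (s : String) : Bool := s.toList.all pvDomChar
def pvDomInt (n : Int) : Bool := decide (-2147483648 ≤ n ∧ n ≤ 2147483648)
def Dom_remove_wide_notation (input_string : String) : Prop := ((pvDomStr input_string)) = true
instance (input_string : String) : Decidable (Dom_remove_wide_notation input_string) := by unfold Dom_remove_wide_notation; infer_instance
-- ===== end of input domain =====

-- B replaces A's six whole-string replace passes by one character-by-character pass through a dict lookup (objective: simpler).

-- ===== PORT A =====
def remove_wide_notation (input_string : String) : String :=
  let replace_dict : PySem.Dict String String :=
    PySem.Dict.ofList [("u", "Uw"), ("d", "Dw"), ("f", "Fw"), ("b", "Bw"), ("l", "Lw"), ("r", "Rw")]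
  replace_dict.items.foldl (fun output_string p => PySem.Str.replace output_string p.1 p.2) input_string

-- ===== PORT B =====
-- the literal dict of Source B; one-character Python strings used as loop variable / keys are ported as Char
def rwnAltDict : PySem.Dict Char String :=
  PySem.Dict.ofList [('u', "Uw"), ('d', "Dw"), ('f', "Fw"), ('b', "Bw"), ('l', "Lw"), ('r', "Rw")]

def remove_wide_notation_alt (input_string : String) : String :=
  PySem.Str.join "" (input_string.toList.map (fun c => rwnAltDict.getD c (String.ofList [c])))

-- ===== PRECONDITION & SPEC =====
def Spec_remove_wide_notation (input_string : String) (out : String) : Prop := out = remove_wide_notation_alt input_string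
instance (input_string : String) (out : String) : Decidable (Spec_remove_wide_notation input_string out) := by unfold Spec_remove_wide_notation; infer_instance

-- ===== CLAIM (what is proved, stated in full; the proofs are below) =====
def Claim_equal_remove_wide_notation : Prop := ∀ (input_string : String), Dom_remove_wide_notation input_string → Spec_remove_wide_notation input_string (remove_wide_notation input_string)

-- ===== LEMMAS AND PROOFS =====

-- Python's str.replace with a single-character pattern is a flatMap over the characters.
theorem replace_go_single (c : Char) (new : List Char) :
    ∀ (fuel : Nat) (l acc : List Char), l.length ≤ fuel →
      PySem.Chars.replace.go [c] new fuel l acc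
        = acc.reverse ++ l.flatMap (fun x => if x = c then new else [x]) := by
  intro fuel
  induction fuel with
  | zero =>
    intro l acc h
    have : l = [] := List.eq_nil_of_length_eq_zero (Nat.le_zero.mp h)
    subst this
    simp [PySem.Chars.replace.go]
  | succ n ih =>
    intro l acc h
    cases l with
    | nil => simp [PySem.Chars.replace.go]
    | cons x t =>
      by_cases hx : x = c
      · subst hx
        have hpre : [x].isPrefixOf (x :: t) = true := by
          simp [List.isPrefixOf]
        rw [PySem.Chars.replace.go]
        simp only [hpre, if_true]
        have ht : t.length ≤ n := by simpa using h
        have hdrop : List.drop [x].length (x :: t) = t := rfl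
        rw [hdrop, ih t (new.reverse ++ acc) ht]
        simp
      · have hpre : [c].isPrefixOf (x :: t) = false := by
          simp [List.isPrefixOf]
          exact fun h => hx h.symm
        rw [PySem.Chars.replace.go]
        simp only [hpre, Bool.false_eq_true, if_false]
        have ht : t.length ≤ n := by simpa using h
        rw [ih t (x :: acc) ht]
        simp [hx]

theorem replace_single (l : List Char) (c : Char) (new : List Char) :
    PySem.Chars.replace l [c] new = l.flatMap (fun x => if x = c then new else [x]) := by
  rw [PySem.Chars.replace]
  simp only [List.isEmpty_cons, Bool.false_eq_true, if_false]
  exact replace_go_single c new l.length l [] (le_refl _)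

-- the per-character map that B computes, written out
def rwnG (c : Char) : List Char :=
  if c = 'u' then ['U','w'] else if c = 'd' then ['D','w'] else if c = 'f' then ['F','w']
  else if c = 'b' then ['B','w'] else if c = 'l' then ['L','w'] else if c = 'r' then ['R','w'] else [c]

theorem alt_getD (c : Char) : (rwnAltDict.getD c (String.ofList [c])).toList = rwnG c := by
  by_cases hu : c = 'u'
  · subst hu; decide
  by_cases hd : c = 'd'
  · subst hd; decide
  by_cases hf : c = 'f'
  · subst hf; decide
  by_cases hb : c = 'b'
  · subst hb; decide
  by_cases hl : c = 'l'
  · subst hl; decide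
  by_cases hr : c = 'r'
  · subst hr; decide
  have hk : rwnAltDict.keys = ['u','d','f','b','l','r'] := by decide
  have hc : rwnAltDict.contains c = false := by
    rw [PySem.Dict.contains_eq_decide_mem_keys, hk]
    simp [hu, hd, hf, hb, hl, hr]
  rw [PySem.Dict.getD_of_not_contains _ _ hc, String.toList_ofList]
  simp [rwnG, hu, hd, hf, hb, hl, hr]

-- one substitution step commutes past the remaining ones: the chain of six flatMaps is one flatMap of rwnG
theorem chain_eq (l : List Char) :
    ((((((l.flatMap (fun x => if x = 'u' then ['U','w'] else [x])).flatMap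
        (fun x => if x = 'd' then ['D','w'] else [x])).flatMap
        (fun x => if x = 'f' then ['F','w'] else [x])).flatMap
        (fun x => if x = 'b' then ['B','w'] else [x])).flatMap
        (fun x => if x = 'l' then ['L','w'] else [x])).flatMap
        (fun x => if x = 'r' then ['R','w'] else [x]))
      = l.flatMap rwnG := by
  induction l with
  | nil => simp
  | cons x t ih =>
    simp only [List.flatMap_cons, List.flatMap_append]
    rw [ih]
    congr 1
    by_cases hu : x = 'u' <;> by_cases hd : x = 'd' <;> by_cases hf : x = 'f' <;>
      by_cases hb : x = 'b' <;> by_cases hl : x = 'l' <;> by_cases hr : x = 'r' <;>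
      simp_all [rwnG]

theorem toList_alt (s : String) :
    (remove_wide_notation_alt s).toList = s.toList.flatMap rwnG := by
  rw [remove_wide_notation_alt, PySem.Str.toList_join]
  have hjoin : ∀ (parts : List (List Char)), PySem.Chars.join ("".toList) parts = parts.flatten := by
    intro parts
    induction parts with
    | nil => rfl
    | cons x t ih => cases t <;> simp_all [PySem.Chars.join, List.intercalate, List.intersperse]
  rw [hjoin]
  simp only [List.map_map]
  rw [List.flatten_eq_flatMap, List.flatMap_map]
  exact List.flatMap_congr (fun c _ => alt_getD c)

theorem toList_a (s : String) :
    (remove_wide_notation s).toList = s.toList.flatMap rwnG := by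
  rw [remove_wide_notation]
  show ((((((PySem.Str.replace (PySem.Str.replace (PySem.Str.replace (PySem.Str.replace (PySem.Str.replace (PySem.Str.replace s "u" "Uw") "d" "Dw") "f" "Fw") "b" "Bw") "l" "Lw") "r" "Rw")))))).toList = _
  simp only [PySem.Str.replace, String.toList_ofList]
  rw [show "u".toList = ['u'] from by decide, show "d".toList = ['d'] from by decide,
      show "f".toList = ['f'] from by decide, show "b".toList = ['b'] from by decide,
      show "l".toList = ['l'] from by decide, show "r".toList = ['r'] from by decide,
      show "Uw".toList = ['U','w'] from by decide, show "Dw".toList = ['D','w'] from by decide,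
      show "Fw".toList = ['F','w'] from by decide, show "Bw".toList = ['B','w'] from by decide,
      show "Lw".toList = ['L','w'] from by decide, show "Rw".toList = ['R','w'] from by decide]
  rw [replace_single, replace_single, replace_single, replace_single, replace_single, replace_single]
  exact chain_eq s.toList

-- ===== VERDICT (by name: the statement is the Claim_ definition above) =====
theorem remove_wide_notation_spec : Claim_equal_remove_wide_notation := by
  intro s _
  unfold Spec_remove_wide_notation
  have h := (toList_a s).trans (toList_alt s).symm
  exact String.toList_injective h
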